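-- pv_equiv track=rewrite | github.com/kimmbk/doc-search-rai | src/document_layer/retriever.py | _match_gdc_concepts
-- ===== SOURCE A (Python) =====
-- GDC_DESCRIPTIONS = {
--     "1": "quality standards and records",
--     "2": "design bases for protection against natural phenomena earthquakes seismic tornadoes hurricanes floods tsunami site parameters",
--     "3": "fire protection",
--     "4": "environmental and dynamic effects design bases missiles pipe whip",
--     "5": "sharing of structures systems and components",
--     "10": "reactor design",
--     "11": "reactor inherent protection",
--     "12": "suppression of reactor power oscillations",
--     "13": "instrumentation and control",
--     "14": "reactor coolant pressure boundary",
--     "15": "reactor coolant system design",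
--     "16": "containment design leaktight barrier",
--     "17": "electric power systems",
--     "18": "inspection and testing of electric power systems",
--     "19": "control room",
--     "20": "protection system functions",
--     "21": "protection system reliability and testability",
--     "22": "protection system independence",
--     "23": "protection system failure modes",
--     "24": "separation of protection and control systems",
--     "25": "protection system requirements for reactivity control malfunctions",
--     "26": "reactivity control system redundancy and capability",
--     "27": "combined reactivity control systems capability",
--     "28": "reactivity limits",
--     "29": "protection against anticipated operational occurrences",
--     "30": "quality of reactor coolant pressure boundary",
--     "31": "fracture prevention of reactor coolant pressure boundary",
--     "32": "inspection of reactor coolant pressure boundary",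
--     "33": "reactor coolant makeup",
--     "34": "residual heat removal",
--     "35": "emergency core cooling",
--     "36": "inspection of emergency core cooling system",
--     "37": "testing of emergency core cooling system",
--     "38": "containment heat removal",
--     "39": "inspection of containment heat removal system",
--     "40": "testing of containment heat removal system",
--     "41": "containment atmosphere cleanup",
--     "42": "inspection of containment atmosphere cleanup systems",
--     "43": "testing of containment atmosphere cleanup systems",
--     "44": "cooling water structural and equipment cooling",
--     "45": "inspection of cooling water system",
--     "46": "testing of cooling water system",
--     "50": "containment design basis pressure temperature",
--     "51": "fracture prevention of containment pressure boundary",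
--     "52": "capability for containment leakage rate testing",
--     "53": "provisions for containment testing and inspection",
--     "54": "piping systems penetrating containment",
--     "55": "reactor coolant pressure boundary penetrating containment",
--     "56": "primary containment isolation",
--     "60": "control of releases of radioactive materials to the environment",
--     "61": "fuel storage and handling and radioactivity control",
--     "62": "prevention of criticality in fuel storage and handling",
--     "63": "monitoring fuel and waste storage",
--     "64": "monitoring radioactivity releases",
-- }
--
-- def _match_gdc_concepts(query: str) -> list[str]:
--     """쿼리에서 GDC 주제와 매칭되는 GDC 번호를 반환."""
--     query_lower = query.lower()
--     query_tokens = set(query_lower.split())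
--     matched = []
--     for gdc_num, desc in GDC_DESCRIPTIONS.items():
--         desc_tokens = set(desc.split())
--         overlap = query_tokens & desc_tokens
--         # 최소 2개 주제 단어 매칭 (불용어 제외)
--         meaningful = overlap - {"and", "of", "the", "for", "in", "to", "a", "an"}
--         if len(meaningful) >= 2:
--             matched.append(gdc_num)
--     return matched
-- ===== SOURCE B (Python) =====
-- # B: inverted-index lookup. The index (meaningful keyword -> GDC numbers, stopwords
-- # removed, keywords counted once per description) and the GDC number order were
-- # precomputed once from GDC_DESCRIPTIONS; the per-query work is a counting pass
-- # over the distinct query tokens through the index.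
--
-- _GDC_ORDER = ['1', '2', '3', '4', '5', '10', '11', '12', '13', '14', '15', '16', '17', '18', '19', '20', '21', '22', '23', '24', '25', '26', '27', '28', '29', '30', '31', '32', '33', '34', '35', '36', '37', '38', '39', '40', '41', '42', '43', '44', '45', '46', '50', '51', '52', '53', '54', '55', '56', '60', '61', '62', '63', '64']
-- _INDEX = {
--     'quality': ['1', '30'],
--     'standards': ['1'],
--     'records': ['1'],
--     'design': ['2', '4', '10', '15', '16', '50'],
--     'bases': ['2', '4'],
--     'protection': ['2', '3', '11', '20', '21', '22', '23', '24', '25', '29'],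
--     'against': ['2', '29'],
--     'natural': ['2'],
--     'phenomena': ['2'],
--     'earthquakes': ['2'],
--     'seismic': ['2'],
--     'tornadoes': ['2'],
--     'hurricanes': ['2'],
--     'floods': ['2'],
--     'tsunami': ['2'],
--     'site': ['2'],
--     'parameters': ['2'],
--     'fire': ['3'],
--     'environmental': ['4'],
--     'dynamic': ['4'],
--     'effects': ['4'],
--     'missiles': ['4'],
--     'pipe': ['4'],
--     'whip': ['4'],
--     'sharing': ['5'],
--     'structures': ['5'],
--     'systems': ['5', '17', '18', '24', '27', '42', '43', '54'],
--     'components': ['5'],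
--     'reactor': ['10', '11', '12', '14', '15', '30', '31', '32', '33', '55'],
--     'inherent': ['11'],
--     'suppression': ['12'],
--     'power': ['12', '17', '18'],
--     'oscillations': ['12'],
--     'instrumentation': ['13'],
--     'control': ['13', '19', '24', '25', '26', '27', '60', '61'],
--     'coolant': ['14', '15', '30', '31', '32', '33', '55'],
--     'pressure': ['14', '30', '31', '32', '50', '51', '55'],
--     'boundary': ['14', '30', '31', '32', '51', '55'],
--     'system': ['15', '20', '21', '22', '23', '25', '26', '36', '37', '39', '40', '45', '46'],
--     'containment': ['16', '38', '39', '40', '41', '42', '43', '50', '51', '52', '53', '54', '55', '56'],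
--     'leaktight': ['16'],
--     'barrier': ['16'],
--     'electric': ['17', '18'],
--     'inspection': ['18', '32', '36', '39', '42', '45', '53'],
--     'testing': ['18', '37', '40', '43', '46', '52', '53'],
--     'room': ['19'],
--     'functions': ['20'],
--     'reliability': ['21'],
--     'testability': ['21'],
--     'independence': ['22'],
--     'failure': ['23'],
--     'modes': ['23'],
--     'separation': ['24'],
--     'requirements': ['25'],
--     'reactivity': ['25', '26', '27', '28'],
--     'malfunctions': ['25'],
--     'redundancy': ['26'],
--     'capability': ['26', '27', '52'],
--     'combined': ['27'],
--     'limits': ['28'],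
--     'anticipated': ['29'],
--     'operational': ['29'],
--     'occurrences': ['29'],
--     'fracture': ['31', '51'],
--     'prevention': ['31', '51', '62'],
--     'makeup': ['33'],
--     'residual': ['34'],
--     'heat': ['34', '38', '39', '40'],
--     'removal': ['34', '38', '39', '40'],
--     'emergency': ['35', '36', '37'],
--     'core': ['35', '36', '37'],
--     'cooling': ['35', '36', '37', '44', '45', '46'],
--     'atmosphere': ['41', '42', '43'],
--     'cleanup': ['41', '42', '43'],
--     'water': ['44', '45', '46'],
--     'structural': ['44'],
--     'equipment': ['44'],
--     'basis': ['50'],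
--     'temperature': ['50'],
--     'leakage': ['52'],
--     'rate': ['52'],
--     'provisions': ['53'],
--     'piping': ['54'],
--     'penetrating': ['54', '55'],
--     'primary': ['56'],
--     'isolation': ['56'],
--     'releases': ['60', '64'],
--     'radioactive': ['60'],
--     'materials': ['60'],
--     'environment': ['60'],
--     'fuel': ['61', '62', '63'],
--     'storage': ['61', '62', '63'],
--     'handling': ['61', '62'],
--     'radioactivity': ['61', '64'],
--     'criticality': ['62'],
--     'monitoring': ['63', '64'],
--     'waste': ['63'],
-- }
--
--
-- def _match_gdc_concepts(query: str) -> list[str]: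
--     """쿼리에서 GDC 주제와 매칭되는 GDC 번호를 반환."""
--     counts = {}
--     for tok in dict.fromkeys(query.lower().split()):
--         for num in _INDEX.get(tok, []):
--             counts[num] = counts.get(num, 0) + 1
--     return [num for num in _GDC_ORDER if counts.get(num, 0) >= 2]
-- ===== Notes on version B (the rewrite author's own statement) =====
-- stated objective: alternative
-- what changed: B replaces A's per-description set-intersection scan with a precomputed inverted index (meaningful keyword -> GDC numbers, stopwords removed, one hit per description), counting per-GDC hits from the distinct query tokens and emitting numbers in the table's insertion order.
import Mathlib
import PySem

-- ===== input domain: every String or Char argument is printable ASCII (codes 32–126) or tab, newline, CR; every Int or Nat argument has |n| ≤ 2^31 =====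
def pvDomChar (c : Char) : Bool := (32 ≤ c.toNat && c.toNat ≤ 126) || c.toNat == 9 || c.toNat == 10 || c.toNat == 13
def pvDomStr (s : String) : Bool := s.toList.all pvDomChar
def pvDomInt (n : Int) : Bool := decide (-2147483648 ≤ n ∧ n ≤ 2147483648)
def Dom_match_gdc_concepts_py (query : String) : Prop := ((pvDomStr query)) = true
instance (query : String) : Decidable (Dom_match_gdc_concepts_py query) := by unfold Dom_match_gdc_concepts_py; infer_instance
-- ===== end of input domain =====

-- B replaces A's per-description set-intersection scan with a precomputed inverted index
-- (meaningful keyword -> GDC numbers) over which the distinct query tokens are counted (objective: alternative).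

-- The module constant GDC_DESCRIPTIONS (a dict, as an insertion-ordered association list).
def pvGdc : List (String × String) := [
  ("1", "quality standards and records"),
  ("2", "design bases for protection against natural phenomena earthquakes seismic tornadoes hurricanes floods tsunami site parameters"),
  ("3", "fire protection"),
  ("4", "environmental and dynamic effects design bases missiles pipe whip"),
  ("5", "sharing of structures systems and components"),
  ("10", "reactor design"),
  ("11", "reactor inherent protection"),
  ("12", "suppression of reactor power oscillations"),
  ("13", "instrumentation and control"),
  ("14", "reactor coolant pressure boundary"),
  ("15", "reactor coolant system design"),
  ("16", "containment design leaktight barrier"),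
  ("17", "electric power systems"),
  ("18", "inspection and testing of electric power systems"),
  ("19", "control room"),
  ("20", "protection system functions"),
  ("21", "protection system reliability and testability"),
  ("22", "protection system independence"),
  ("23", "protection system failure modes"),
  ("24", "separation of protection and control systems"),
  ("25", "protection system requirements for reactivity control malfunctions"),
  ("26", "reactivity control system redundancy and capability"),
  ("27", "combined reactivity control systems capability"),
  ("28", "reactivity limits"),
  ("29", "protection against anticipated operational occurrences"),
  ("30", "quality of reactor coolant pressure boundary"),
  ("31", "fracture prevention of reactor coolant pressure boundary"),
  ("32", "inspection of reactor coolant pressure boundary"),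
  ("33", "reactor coolant makeup"),
  ("34", "residual heat removal"),
  ("35", "emergency core cooling"),
  ("36", "inspection of emergency core cooling system"),
  ("37", "testing of emergency core cooling system"),
  ("38", "containment heat removal"),
  ("39", "inspection of containment heat removal system"),
  ("40", "testing of containment heat removal system"),
  ("41", "containment atmosphere cleanup"),
  ("42", "inspection of containment atmosphere cleanup systems"),
  ("43", "testing of containment atmosphere cleanup systems"),
  ("44", "cooling water structural and equipment cooling"),
  ("45", "inspection of cooling water system"),
  ("46", "testing of cooling water system"),
  ("50", "containment design basis pressure temperature"),
  ("51", "fracture prevention of containment pressure boundary"),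
  ("52", "capability for containment leakage rate testing"),
  ("53", "provisions for containment testing and inspection"),
  ("54", "piping systems penetrating containment"),
  ("55", "reactor coolant pressure boundary penetrating containment"),
  ("56", "primary containment isolation"),
  ("60", "control of releases of radioactive materials to the environment"),
  ("61", "fuel storage and handling and radioactivity control"),
  ("62", "prevention of criticality in fuel storage and handling"),
  ("63", "monitoring fuel and waste storage"),
  ("64", "monitoring radioactivity releases")]

def pvStop : List String := ["and", "of", "the", "for", "in", "to", "a", "an"]

-- ===== PORT A =====
def match_gdc_concepts_py (query : String) : List String :=
  let queryTokens : PySem.Set String := PySem.Set.ofList (PySem.Str.split₀ (PySem.Str.lower query))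
  pvGdc.foldl (fun matched p =>
    let descTokens : PySem.Set String := PySem.Set.ofList (PySem.Str.split₀ p.2)
    let overlap := PySem.Set.inter queryTokens descTokens
    let meaningful := PySem.Set.diff overlap (PySem.Set.ofList pvStop)
    if 2 ≤ PySem.Set.len meaningful then matched ++ [p.1] else matched) []

-- ===== PORT B =====
-- Source B's module constants: the GDC number order and the precomputed inverted index
-- (meaningful keyword -> GDC numbers, stopwords removed, each keyword once per description).
def pvOrder : List String := ["1", "2", "3", "4", "5", "10", "11", "12", "13", "14", "15", "16", "17", "18", "19", "20", "21", "22", "23", "24", "25", "26", "27", "28", "29", "30", "31", "32", "33", "34", "35", "36", "37", "38", "39", "40", "41", "42", "43", "44", "45", "46", "50", "51", "52", "53", "54", "55", "56", "60", "61", "62", "63", "64"]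

def pvIndex : PySem.Dict String (List String) := PySem.Dict.ofList [
  ("quality", ["1", "30"]),
  ("standards", ["1"]),
  ("records", ["1"]),
  ("design", ["2", "4", "10", "15", "16", "50"]),
  ("bases", ["2", "4"]),
  ("protection", ["2", "3", "11", "20", "21", "22", "23", "24", "25", "29"]),
  ("against", ["2", "29"]),
  ("natural", ["2"]),
  ("phenomena", ["2"]),
  ("earthquakes", ["2"]),
  ("seismic", ["2"]),
  ("tornadoes", ["2"]),
  ("hurricanes", ["2"]),
  ("floods", ["2"]),
  ("tsunami", ["2"]),
  ("site", ["2"]),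
  ("parameters", ["2"]),
  ("fire", ["3"]),
  ("environmental", ["4"]),
  ("dynamic", ["4"]),
  ("effects", ["4"]),
  ("missiles", ["4"]),
  ("pipe", ["4"]),
  ("whip", ["4"]),
  ("sharing", ["5"]),
  ("structures", ["5"]),
  ("systems", ["5", "17", "18", "24", "27", "42", "43", "54"]),
  ("components", ["5"]),
  ("reactor", ["10", "11", "12", "14", "15", "30", "31", "32", "33", "55"]),
  ("inherent", ["11"]),
  ("suppression", ["12"]),
  ("power", ["12", "17", "18"]),
  ("oscillations", ["12"]),
  ("instrumentation", ["13"]),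
  ("control", ["13", "19", "24", "25", "26", "27", "60", "61"]),
  ("coolant", ["14", "15", "30", "31", "32", "33", "55"]),
  ("pressure", ["14", "30", "31", "32", "50", "51", "55"]),
  ("boundary", ["14", "30", "31", "32", "51", "55"]),
  ("system", ["15", "20", "21", "22", "23", "25", "26", "36", "37", "39", "40", "45", "46"]),
  ("containment", ["16", "38", "39", "40", "41", "42", "43", "50", "51", "52", "53", "54", "55", "56"]),
  ("leaktight", ["16"]),
  ("barrier", ["16"]),
  ("electric", ["17", "18"]),
  ("inspection", ["18", "32", "36", "39", "42", "45", "53"]),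
  ("testing", ["18", "37", "40", "43", "46", "52", "53"]),
  ("room", ["19"]),
  ("functions", ["20"]),
  ("reliability", ["21"]),
  ("testability", ["21"]),
  ("independence", ["22"]),
  ("failure", ["23"]),
  ("modes", ["23"]),
  ("separation", ["24"]),
  ("requirements", ["25"]),
  ("reactivity", ["25", "26", "27", "28"]),
  ("malfunctions", ["25"]),
  ("redundancy", ["26"]),
  ("capability", ["26", "27", "52"]),
  ("combined", ["27"]),
  ("limits", ["28"]),
  ("anticipated", ["29"]),
  ("operational", ["29"]),
  ("occurrences", ["29"]),
  ("fracture", ["31", "51"]),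
  ("prevention", ["31", "51", "62"]),
  ("makeup", ["33"]),
  ("residual", ["34"]),
  ("heat", ["34", "38", "39", "40"]),
  ("removal", ["34", "38", "39", "40"]),
  ("emergency", ["35", "36", "37"]),
  ("core", ["35", "36", "37"]),
  ("cooling", ["35", "36", "37", "44", "45", "46"]),
  ("atmosphere", ["41", "42", "43"]),
  ("cleanup", ["41", "42", "43"]),
  ("water", ["44", "45", "46"]),
  ("structural", ["44"]),
  ("equipment", ["44"]),
  ("basis", ["50"]),
  ("temperature", ["50"]),
  ("leakage", ["52"]),
  ("rate", ["52"]),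
  ("provisions", ["53"]),
  ("piping", ["54"]),
  ("penetrating", ["54", "55"]),
  ("primary", ["56"]),
  ("isolation", ["56"]),
  ("releases", ["60", "64"]),
  ("radioactive", ["60"]),
  ("materials", ["60"]),
  ("environment", ["60"]),
  ("fuel", ["61", "62", "63"]),
  ("storage", ["61", "62", "63"]),
  ("handling", ["61", "62"]),
  ("radioactivity", ["61", "64"]),
  ("criticality", ["62"]),
  ("monitoring", ["63", "64"]),
  ("waste", ["63"])]

def match_gdc_concepts_py_alt (query : String) : List String :=
  let counts : PySem.Dict String Int :=
    (PySem.List.dedup (PySem.Str.split₀ (PySem.Str.lower query))).foldl (fun c tok =>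
      (pvIndex.getD tok []).foldl (fun c num => c.modify num 0 (· + 1)) c) PySem.Dict.empty
  pvOrder.filter (fun num => 2 ≤ counts.getD num 0)

-- ===== PRECONDITION & SPEC =====
def Spec_match_gdc_concepts_py (query : String) (out : List String) : Prop := out = match_gdc_concepts_py_alt query
instance (query : String) (out : List String) : Decidable (Spec_match_gdc_concepts_py query out) := by unfold Spec_match_gdc_concepts_py; infer_instance

-- ===== CLAIM (what is proved, stated in full; the proofs are below) =====
def Claim_equal_match_gdc_concepts_py : Prop := ∀ (query : String), Dom_match_gdc_concepts_py query → Spec_match_gdc_concepts_py query (match_gdc_concepts_py query)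

-- ===== LEMMAS AND PROOFS =====

-- proof-side view of the index: the meaningful keywords of one entry, and all (keyword, number) pairs
def pvKws (p : String × String) : List String :=
  (PySem.List.dedup (PySem.Str.split₀ p.2)).filter (fun kw => !pvStop.contains kw)

def pvPairs : List (String × String) :=
  pvGdc.flatMap (fun p => (pvKws p).map (fun kw => (kw, p.1)))

-- B's literal order list and literal index agree with what A's table induces
set_option maxRecDepth 100000 in
theorem pvOrder_eq : pvOrder = pvGdc.map Prod.fst := by decide

set_option maxRecDepth 1000000 in
set_option maxHeartbeats 4000000 in
theorem pvIndex_eq : pvIndex =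
    pvPairs.foldl (fun d q => d.modify q.1 [] (· ++ [q.2])) PySem.Dict.empty := by decide

theorem pvIndex_getD (tok : String) :
    pvIndex.getD tok [] = (pvPairs.filter (fun q => q.1 == tok)).map (fun q => q.2) := by
  rw [pvIndex_eq, PySem.Dict.getD_foldl_modify_append, PySem.Dict.getD_empty]
  simp

theorem sum_concentrate (g : (String × String) → ℕ) :
    ∀ (l : List (String × String)) (p : String × String), (l.map Prod.fst).Nodup → p ∈ l →
    (∀ p' ∈ l, p'.1 ≠ p.1 → g p' = 0) → (l.map g).sum = g p := by
  intro l
  induction l with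
  | nil => intro p _ hp; exact absurd hp (List.not_mem_nil)
  | cons hd tl ih =>
    intro p hnd hp h0
    rw [List.map_cons] at hnd
    have hhd : hd.1 ∉ tl.map Prod.fst := (List.nodup_cons.mp hnd).1
    have hnd' := (List.nodup_cons.mp hnd).2
    rcases List.mem_cons.mp hp with rfl | hmem
    · have hz : ∀ p' ∈ tl, g p' = 0 := by
        intro p' hp'
        refine h0 p' (List.mem_cons_of_mem _ hp') ?_
        intro he
        exact hhd (he ▸ List.mem_map_of_mem hp')
      simp only [List.map_cons, List.sum_cons]
      have : (tl.map g).sum = 0 := by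
        apply List.sum_eq_zero
        intro x hx
        obtain ⟨p', hp', rfl⟩ := List.mem_map.mp hx
        exact hz p' hp'
      omega
    · have hgz : g hd = 0 := by
        refine h0 hd List.mem_cons_self ?_
        intro he
        exact hhd (he.symm ▸ List.mem_map_of_mem hmem)
      simp only [List.map_cons, List.sum_cons, hgz, Nat.zero_add]
      exact ih p hnd' hmem (fun p' h' => h0 p' (List.mem_cons_of_mem _ h'))

set_option maxRecDepth 100000 in
theorem pvGdc_keys_nodup : (pvGdc.map Prod.fst).Nodup := by decide

theorem pvKws_nodup (p : String × String) : (pvKws p).Nodup :=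
  (PySem.List.nodup_dedup _).filter _

-- count of a GDC number in the postings of one token: 1 iff the token is a meaningful keyword of that entry
theorem postings_count (p : String × String) (hp : p ∈ pvGdc) (tok : String) :
    (pvIndex.getD tok []).count p.1 = (if tok ∈ pvKws p then 1 else 0) := by
  rw [pvIndex_getD, List.count_eq_countP, List.countP_map, List.countP_filter]
  unfold pvPairs
  rw [List.countP_flatMap]
  have hmap : (pvGdc.map ((List.countP fun a => ((fun x => x == p.1) ∘ fun q => q.2) a && a.1 == tok) ∘
      fun p' => (pvKws p').map (fun kw => (kw, p'.1))))
      = pvGdc.map (fun p' => (pvKws p').countP (fun kw => (p'.1 == p.1) && (kw == tok))) := by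
    apply List.map_congr_left
    intro p' _
    simp only [Function.comp, List.countP_map]
    apply List.countP_congr
    intro kw _
    simp
  rw [hmap, sum_concentrate (fun p' => (pvKws p').countP (fun kw => (p'.1 == p.1) && (kw == tok)))
    pvGdc p pvGdc_keys_nodup hp ?_]
  · rw [show List.countP (fun kw => (p.1 == p.1) && (kw == tok)) (pvKws p)
        = List.countP (fun kw => kw == tok) (pvKws p) from by
      apply List.countP_congr; intro kw _; simp]
    rw [← List.count_eq_countP, List.Nodup.count (pvKws_nodup p)]
  · intro p' _ hne
    apply List.countP_eq_zero.mpr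
    intro kw _
    simp [hne]

theorem sum_ite_countP (P : String → Prop) [DecidablePred P] (Q : List String) :
    (Q.map (fun tok => if P tok then (1 : ℕ) else 0)).sum = Q.countP (fun tok => decide (P tok)) := by
  induction Q with
  | nil => simp
  | cons hd tl ih =>
    rw [List.map_cons, List.sum_cons, List.countP_cons, ih]
    by_cases h : P hd
    · simp [h]
      omega
    · simp [h]

-- B's counter value at a GDC number, for the distinct query tokens Q
theorem counts_getD (Q : List String) (num : String) :
    (Q.foldl (fun c tok => (pvIndex.getD tok []).foldl (fun c n => c.modify n 0 (· + 1)) c)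
      (PySem.Dict.empty : PySem.Dict String Int)).getD num 0
    = ((Q.flatMap (fun tok => pvIndex.getD tok [])).count num : Int) := by
  rw [← List.foldl_flatMap, PySem.Dict.getD_foldl_modify_add_one, PySem.Dict.getD_empty]
  omega

-- the two per-entry scores agree
set_option maxRecDepth 10000 in
theorem score_eq (Q : List String) (p : String × String) (hp : p ∈ pvGdc) :
    ((Q.flatMap (fun tok => pvIndex.getD tok [])).count p.1)
      = Q.countP (fun tok => tok ∈ pvKws p) := by
  rw [List.count_flatMap]
  have hmap : (Q.map (List.count p.1 ∘ fun tok => pvIndex.getD tok []))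
      = Q.map (fun tok => if tok ∈ pvKws p then 1 else 0) := by
    apply List.map_congr_left
    intro tok _
    simp only [Function.comp_apply]
    exact postings_count p hp tok
  rw [hmap, sum_ite_countP]

-- A's meaningful-overlap size, as a countP over the query-token set
theorem meaningful_len (S : List String) (p : String × String) :
    (PySem.Set.diff (PySem.Set.inter S (PySem.Set.ofList (PySem.Str.split₀ p.2)))
        (PySem.Set.ofList pvStop)).length
    = S.countP (fun tok => tok ∈ pvKws p) := by
  unfold PySem.Set.inter PySem.Set.diff
  rw [List.filter_filter, ← List.countP_eq_length_filter]
  apply List.countP_congr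
  intro tok _
  unfold pvKws
  simp only [Bool.and_eq_true, Bool.not_eq_true', decide_eq_true_eq, List.mem_filter,
    PySem.List.mem_dedup, List.contains_eq_mem, decide_eq_false_iff_not]
  constructor <;> rintro ⟨h1, h2⟩ <;> constructor <;>
    simp_all [PySem.Set.mem_ofList, List.contains_eq_mem]

-- ===== VERDICT (by name: the statement is the Claim_ definition above) =====
set_option maxRecDepth 10000 in
theorem match_gdc_concepts_py_spec : Claim_equal_match_gdc_concepts_py := by
  intro query _
  unfold Spec_match_gdc_concepts_py match_gdc_concepts_py match_gdc_concepts_py_alt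
  simp only []
  rw [show PySem.Set.ofList (PySem.Str.split₀ (PySem.Str.lower query))
      = PySem.List.dedup (PySem.Str.split₀ (PySem.Str.lower query)) from
    (PySem.List.dedup_eq_ofList _).symm]
  generalize PySem.Str.split₀ (PySem.Str.lower query) = T
  have hA : (fun (matched : List String) (p : String × String) =>
      if 2 ≤ PySem.Set.len (PySem.Set.diff (PySem.Set.inter (PySem.List.dedup T)
          (PySem.Set.ofList (PySem.Str.split₀ p.2))) (PySem.Set.ofList pvStop))
      then matched ++ [p.1] else matched)
      = (fun matched p =>
      if (decide (2 ≤ PySem.Set.len (PySem.Set.diff (PySem.Set.inter (PySem.List.dedup T)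
          (PySem.Set.ofList (PySem.Str.split₀ p.2))) (PySem.Set.ofList pvStop)))) = true
      then matched ++ [p.1] else matched) := by
    funext m p
    simp only [decide_eq_true_eq]
  rw [hA, PySem.List.foldl_append_if, pvOrder_eq, List.filter_map, List.nil_append]
  refine congrArg (List.map Prod.fst) ?_
  apply List.filter_congr
  intro p hp
  simp only [Function.comp_apply]
  rw [decide_eq_decide]
  rw [counts_getD (PySem.List.dedup T) p.1, score_eq (PySem.List.dedup T) p hp]
  unfold PySem.Set.len
  rw [meaningful_len (PySem.List.dedup T) p]
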